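-- pv_equiv track=rewrite | github.com/JuanDAC/holbertonschool-machine_learning | supervised_learning/0x10-nlp_metrics/0-uni_bleu.py | count_appearances
-- ===== SOURCE A (Python) =====
-- def count_appearances(references, sentence):
--     """
--     Function that counts the appearances of each word in the sentence
--     Args:
--       -  references: list of reference translations
--       -  sentence: list containing the model proposed sentence
--     Returns:
--       - count of each word of references in the sentence
--     """
--
--     sen = list(set(sentence))
--     count_dict = {}
--
--     for reference in references:
--         for word in reference:
--             if word in sen and word not in count_dict.keys():
--                 count_dict[word] = reference.count(word)
--                 continue
--             if word in sen:
--                 new = reference.count(word)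
--                 old = count_dict[word]
--                 count_dict[word] = max(new, old)
--
--     return count_dict.values()
-- ===== SOURCE B (Python) =====
-- def count_appearances(references, sentence):
--     """Two staged passes instead of A's interleaved running-max fold: first
--     collect the sentence words in first-encounter order over the references,
--     then compute each word's value as the maximum count over the references."""
--     sent = set(sentence)
--     order = {}
--     for reference in references:
--         for word in reference:
--             if word in sent:
--                 order[word] = None
--     return {w: max(reference.count(w) for reference in references)
--             for w in order}.values()
-- ===== Notes on version B (the rewrite author's own statement) =====
-- stated objective: faster
-- what changed: A interleaves key discovery with a running per-word maximum, rescanning the sentence list and calling reference.count once per word occurrence; B stages the work: a first pass only records the sentence words (set membership) in first-encounter order, and a separate per-key pass computes each word's value directly as max(reference.count(w) for reference in references).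
import Mathlib
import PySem

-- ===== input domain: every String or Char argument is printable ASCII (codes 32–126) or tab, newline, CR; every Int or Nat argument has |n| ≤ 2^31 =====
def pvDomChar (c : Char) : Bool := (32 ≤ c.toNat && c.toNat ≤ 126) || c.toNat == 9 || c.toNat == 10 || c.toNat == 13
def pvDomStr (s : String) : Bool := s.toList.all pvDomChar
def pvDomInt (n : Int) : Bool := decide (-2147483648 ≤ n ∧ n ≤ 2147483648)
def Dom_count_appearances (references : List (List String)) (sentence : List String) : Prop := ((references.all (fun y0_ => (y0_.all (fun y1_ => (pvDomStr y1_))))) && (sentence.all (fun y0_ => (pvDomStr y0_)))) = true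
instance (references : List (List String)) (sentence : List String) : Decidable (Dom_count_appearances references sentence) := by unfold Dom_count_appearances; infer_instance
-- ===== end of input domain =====

-- B replaces A's interleaved running-max fold by two staged passes (sentence-word key
-- order collected first, then a separate per-key maximum over the references); objective: alternative decomposition.


-- ===== PORT A =====
def count_appearances (references : List (List String)) (sentence : List String) : List Int :=
  -- sen = list(set(sentence)): only membership of sen is used below, so the set's iteration order is immaterial
  let sen : List String := PySem.Set.ofList sentence
  let d : PySem.Dict String Int := references.foldl (fun cd reference =>
    reference.foldl (fun cd word =>
      if sen.contains word && !cd.contains word then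
        cd.insert word (PySem.List.count reference word)
      else if sen.contains word then
        -- count_dict[word]: the key is present in this branch, so getD's default is unreachable
        cd.insert word (max (PySem.List.count reference word) (cd.getD word 0))
      else cd) cd) PySem.Dict.empty
  d.values

-- ===== PORT B =====
def count_appearances_alt (references : List (List String)) (sentence : List String) : List Int :=
  let sent : PySem.Set String := PySem.Set.ofList sentence
  let order : PySem.Dict String Unit := references.foldl (fun od reference =>
    reference.foldl (fun od word =>
      if PySem.Set.contains sent word then od.insert word () else od) od) PySem.Dict.empty
  -- dict comprehension {w: max(...) for w in order}; each key w lies in some reference, so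
  -- references is nonempty there: Python's max over the generator cannot raise and getD's 0 is unreachable
  let result : PySem.Dict String Int := order.keys.foldl (fun d w =>
    d.insert w ((PySem.List.max? (references.map (fun reference => (PySem.List.count reference w : Int))) (fun x => x)).getD 0)) PySem.Dict.empty
  result.values

-- ===== PRECONDITION & SPEC =====
def Spec_count_appearances (references : List (List String)) (sentence : List String) (out : List Int) : Prop := out = count_appearances_alt references sentence
instance (references : List (List String)) (sentence : List String) (out : List Int) : Decidable (Spec_count_appearances references sentence out) := by unfold Spec_count_appearances; infer_instance

-- ===== CLAIM (what is proved, stated in full; the proofs are below) =====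
def Claim_equal_count_appearances : Prop := ∀ (references : List (List String)) (sentence : List String), Dom_count_appearances references sentence → Spec_count_appearances references sentence (count_appearances references sentence)

-- ===== LEMMAS AND PROOFS =====

-- A's word step, normalised: on sentence words, replace the stored value by its max with h w
def pvStep (sen : List String) (h : String → Int) (d : PySem.Dict String Int) (w : String) : PySem.Dict String Int :=
  if sen.contains w then d.insert w (max (d.getD w 0) (h w)) else d

theorem pv_innerA_eq (sen : List String) :
    (fun (cd : PySem.Dict String Int) (reference : List String) => reference.foldl (fun cd word =>
      if sen.contains word && !cd.contains word then
        cd.insert word (PySem.List.count reference word)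
      else if sen.contains word then
        cd.insert word (max (PySem.List.count reference word) (cd.getD word 0))
      else cd) cd)
    = (fun cd reference => reference.foldl (pvStep sen (fun w => (PySem.List.count reference w : Int))) cd) := by
  funext cd reference
  have he : (fun (cd : PySem.Dict String Int) word =>
      if sen.contains word && !cd.contains word then
        cd.insert word ((PySem.List.count reference word : Int))
      else if sen.contains word then
        cd.insert word (max ((PySem.List.count reference word : Int)) (cd.getD word 0))
      else cd) = pvStep sen (fun w => (PySem.List.count reference w : Int)) := by
    funext cd word
    unfold pvStep
    by_cases hs : word ∈ sen
    · by_cases hc : cd.contains word = true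
      · simp [hs, hc, max_comm]
      · have h0 : cd.getD word 0 = 0 :=
          PySem.Dict.getD_of_not_contains cd 0 (by simp [hc])
        simp [hs, hc, h0]
    · simp [hs]
  rw [he]

theorem pv_getD_inner (sen : List String) (h : String → Int) (l : List String) :
    ∀ (d : PySem.Dict String Int) (w : String),
    (l.foldl (pvStep sen h) d).getD w 0
      = if w ∈ sen ∧ w ∈ l then max (d.getD w 0) (h w) else d.getD w 0 := by
  induction l with
  | nil => intro d w; simp
  | cons x l ih =>
    intro d w
    rw [List.foldl_cons, ih]
    by_cases hsx : x ∈ sen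
    · have hpx : pvStep sen h d x = d.insert x (max (d.getD x 0) (h x)) := by
        unfold pvStep; rw [if_pos (by simpa using hsx)]
      rw [hpx, PySem.Dict.getD_insert]
      by_cases h2 : w = x <;> by_cases hll : w ∈ l <;>
        simp_all [List.mem_cons]
    · have hpx : pvStep sen h d x = d := by
        unfold pvStep; rw [if_neg (by simpa using hsx)]
      rw [hpx]
      by_cases h2 : w = x <;> by_cases hll : w ∈ l <;>
        simp_all [List.mem_cons]

theorem pv_getD_outer (sen : List String) (refs : List (List String)) :
    ∀ (d : PySem.Dict String Int) (w : String), 0 ≤ d.getD w 0 →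
    (refs.foldl (fun cd r => r.foldl (pvStep sen (fun u => (PySem.List.count r u : Int))) cd) d).getD w 0
      = if w ∈ sen then refs.foldl (fun a r => max a ((PySem.List.count r w : Int))) (d.getD w 0) else d.getD w 0 := by
  induction refs with
  | nil => intro d w _; simp
  | cons r rest ih =>
    intro d w h0
    rw [List.foldl_cons, List.foldl_cons]
    have hq : (r.foldl (pvStep sen (fun u => (PySem.List.count r u : Int))) d).getD w 0
        = if w ∈ sen then max (d.getD w 0) ((PySem.List.count r w : Int)) else d.getD w 0 := by
      rw [pv_getD_inner]
      by_cases hs : w ∈ sen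
      · by_cases hrr : w ∈ r
        · rw [if_pos ⟨hs, hrr⟩, if_pos hs]
        · rw [if_neg (by tauto), if_pos hs]
          have hc0 : ((PySem.List.count r w : Int)) = 0 := by
            simp [PySem.List.count, List.count_eq_zero_of_not_mem hrr]
          rw [hc0, max_eq_left h0]
      · rw [if_neg (by tauto), if_neg hs]
    have h0' : 0 ≤ (r.foldl (pvStep sen (fun u => (PySem.List.count r u : Int))) d).getD w 0 := by
      rw [hq]
      by_cases hs : w ∈ sen
      · rw [if_pos hs]; exact le_trans h0 (le_max_left _ _)
      · rw [if_neg hs]; exact h0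
    rw [ih _ w h0', hq]
    by_cases hs : w ∈ sen
    · rw [if_pos hs, if_pos hs, if_pos hs]
    · rw [if_neg hs, if_neg hs, if_neg hs]

theorem pv_keys_inner (sen : List String) (h : String → Int) (l : List String) (d : PySem.Dict String Int) :
    (l.foldl (pvStep sen h) d).keys = PySem.Set.update d.keys (l.filter (fun w => sen.contains w)) := by
  have hk := PySem.Dict.keys_foldl_insert (ν := Int) (l.filter (fun w => sen.contains w))
      (fun d x => max (d.getD x 0) (h x)) d
  rw [List.foldl_filter] at hk
  exact hk

theorem pv_keys_outer (sen : List String) (refs : List (List String)) :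
    ∀ (d : PySem.Dict String Int),
    (refs.foldl (fun cd r => r.foldl (pvStep sen (fun u => (PySem.List.count r u : Int))) cd) d).keys
      = refs.foldl (fun ks r => PySem.Set.update ks (r.filter (fun w => sen.contains w))) d.keys := by
  induction refs with
  | nil => intro d; rfl
  | cons r rest ih =>
    intro d
    rw [List.foldl_cons, List.foldl_cons, ih, pv_keys_inner]

theorem pv_keys_order_inner (sen : List String) (l : List String) (d : PySem.Dict String Unit) :
    (l.foldl (fun od word => if PySem.Set.contains sen word then od.insert word () else od) d).keys
      = PySem.Set.update d.keys (l.filter (fun w => sen.contains w)) := by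
  have h1 : (fun (od : PySem.Dict String Unit) word => if PySem.Set.contains sen word then od.insert word () else od)
      = fun (od : PySem.Dict String Unit) word => if sen.contains word then od.insert word () else od := by
    funext od word; rw [PySem.Set.contains_eq_listContains]
  have hk := PySem.Dict.keys_foldl_insert (ν := Unit) (l.filter (fun w => sen.contains w))
      (fun _ _ => ()) d
  rw [List.foldl_filter] at hk
  rw [h1]
  exact hk

theorem pv_keys_order (sen : List String) (refs : List (List String)) :
    ∀ (d : PySem.Dict String Unit),
    (refs.foldl (fun od r => r.foldl (fun od word =>
        if PySem.Set.contains sen word then od.insert word () else od) od) d).keys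
      = refs.foldl (fun ks r => PySem.Set.update ks (r.filter (fun w => sen.contains w))) d.keys := by
  induction refs with
  | nil => intro d; rfl
  | cons r rest ih =>
    intro d
    rw [List.foldl_cons, List.foldl_cons, ih, pv_keys_order_inner]

theorem pv_nodup_keysfold (sen : List String) (refs : List (List String)) :
    ∀ (s : List String), s.Nodup →
    (refs.foldl (fun ks r => PySem.Set.update ks (r.filter (fun w => sen.contains w))) s).Nodup := by
  induction refs with
  | nil => intro s hs; exact hs
  | cons r rest ih => intro s hs; exact ih _ (PySem.Set.nodup_update s _ hs)

theorem pv_mem_keysfold (sen : List String) (refs : List (List String)) (w : String) :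
    ∀ (s : List String),
    w ∈ refs.foldl (fun ks r => PySem.Set.update ks (r.filter (fun w => sen.contains w))) s →
    w ∈ s ∨ (w ∈ sen ∧ ∃ r ∈ refs, w ∈ r) := by
  induction refs with
  | nil => intro s h; exact Or.inl h
  | cons r rest ih =>
    intro s h
    rcases ih _ h with h1 | h2
    · rcases (PySem.Set.mem_update _ _ _).mp h1 with hs | hf
      · exact Or.inl hs
      · rcases List.mem_filter.mp hf with ⟨hwr, hp⟩
        exact Or.inr ⟨by simpa using hp, r, by simp, hwr⟩
    · rcases h2 with ⟨hsen, r', hr', hwr'⟩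
      exact Or.inr ⟨hsen, r', List.mem_cons_of_mem _ hr', hwr'⟩

theorem pv_values_insert_fold (ks : List String) (hnd : ks.Nodup) (v : String → Int) :
    (ks.foldl (fun d w => d.insert w (v w)) (PySem.Dict.empty : PySem.Dict String Int)).values = ks.map v := by
  have hitems := PySem.Dict.items_foldl_insert_fresh ks (fun w => w) v PySem.Dict.empty
      (fun a _ => PySem.Dict.contains_empty a) (by simpa using hnd)
  simp only [PySem.Dict.values]
  rw [hitems, List.map_append]
  have hemp : List.map (fun x => (x : String × Int).2) PySem.Dict.empty.items = [] := rfl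
  rw [hemp, List.map_map, List.nil_append]
  rfl

-- ===== VERDICT (by name: the statement is the Claim_ definition above) =====
theorem count_appearances_spec : Claim_equal_count_appearances := by
  intro references sentence _
  unfold Spec_count_appearances
  simp only [count_appearances, count_appearances_alt]
  rw [pv_innerA_eq]
  have hkA := pv_keys_outer (PySem.Set.ofList sentence) references PySem.Dict.empty
  rw [PySem.Dict.keys_empty] at hkA
  have hkB := pv_keys_order (PySem.Set.ofList sentence) references PySem.Dict.empty
  rw [PySem.Dict.keys_empty] at hkB
  have hnodup := pv_nodup_keysfold (PySem.Set.ofList sentence) references [] List.nodup_nil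
  rw [hkB, pv_values_insert_fold _ hnodup _]
  rw [PySem.Dict.values_eq_map_keys _ (by rw [hkA]; exact hnodup) 0, hkA]
  apply List.map_congr_left
  intro w hw
  rcases pv_mem_keysfold (PySem.Set.ofList sentence) references w [] hw with h | ⟨hsen, r, hr, hwr⟩
  · simp at h
  rw [pv_getD_outer (PySem.Set.ofList sentence) references PySem.Dict.empty w
      (by rw [PySem.Dict.getD_empty]), if_pos hsen, PySem.Dict.getD_empty]
  clear hw hkA hkB hnodup
  cases references with
  | nil => simp at hr
  | cons r0 rest =>
    rw [List.map_cons, PySem.List.max?_id_cons, Option.getD_some, List.foldl_cons, List.foldl_map,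
        max_eq_right (Int.natCast_nonneg _)]
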